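-- pv_equiv track=rewrite | github.com/ForxDeven/ceit101 | lab04.py | digit_count
-- ===== SOURCE A (Python) =====
-- def digit_count(num):
--     num_str = str(num)
--     i=0
--     c_even = 0
--     c_odd = 0
--     c_zero = 0
--     for i in range(len(num_str)):
--
--         if int(num_str[i]) == 0:
--             c_zero += 1
--         elif int(num_str[i]) % 2 ==0:
--             c_even += 1
--         else:
--             c_odd += 1
--
--     return c_even, c_odd, c_zero
-- ===== SOURCE B (Python) =====
-- def digit_count(num):
--     # pure arithmetic: peel digits off with divmod instead of converting to a string
--     def bucket(d):
--         if d == 0: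
--             return (0, 0, 1)
--         if d % 2 == 0:
--             return (1, 0, 0)
--         return (0, 1, 0)
--     c_even = 0
--     c_odd = 0
--     c_zero = 0
--     n = num
--     while n >= 10:
--         n, d = divmod(n, 10)
--         e, o, z = bucket(d)
--         c_even += e
--         c_odd += o
--         c_zero += z
--     e, o, z = bucket(n)
--     return c_even + e, c_odd + o, c_zero + z
-- ===== Notes on version B (the rewrite author's own statement) =====
-- stated objective: alternative
-- what changed: A converts num to a string and classifies each character with int() in an index loop; B never builds a string: it peels digits off arithmetically with divmod(n, 10) in a while loop and adds per-digit bucket triples.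
import Mathlib
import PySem

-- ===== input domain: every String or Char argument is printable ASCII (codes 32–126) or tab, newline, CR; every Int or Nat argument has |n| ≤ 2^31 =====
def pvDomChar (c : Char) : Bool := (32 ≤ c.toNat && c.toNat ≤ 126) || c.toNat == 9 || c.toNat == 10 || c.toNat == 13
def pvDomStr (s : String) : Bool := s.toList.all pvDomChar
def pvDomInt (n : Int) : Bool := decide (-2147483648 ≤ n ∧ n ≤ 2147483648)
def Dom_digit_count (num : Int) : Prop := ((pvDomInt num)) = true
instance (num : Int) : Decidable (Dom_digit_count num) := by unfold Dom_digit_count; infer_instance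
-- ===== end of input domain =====

-- B replaces A's string conversion + per-character int() loop by pure integer arithmetic:
-- digits are peeled off with divmod(n, 10) in a while loop (objective: alternative; same asymptotic cost).

-- ===== PORT A =====
def digit_count (num : Int) : Int × Int × Int :=
  let cs := (PySem.Int.toStr num).toList
  (PySem.List.pyRange 0 (PySem.List.len cs) 1).foldl
    (fun (st : Int × Int × Int) i =>
      -- int(num_str[i]); none = ValueError, excluded by Pre_digit_count
      match PySem.Int.ofChars? [PySem.List.pyGetD cs i ' '] with
      | none => st
      | some d =>
        if d = 0 then (st.1, st.2.1, st.2.2 + 1)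
        else if PySem.Int.mod d 2 = 0 then (st.1 + 1, st.2.1, st.2.2)
        else (st.1, st.2.1 + 1, st.2.2))
    (0, 0, 0)

-- ===== PORT B =====
-- bucket(d): the (even, odd, zero) contribution of one digit value
def pvBucket (d : Int) : Int × Int × Int :=
  if d = 0 then (0, 0, 1)
  else if PySem.Int.mod d 2 = 0 then (1, 0, 0)
  else (0, 1, 0)

-- termination of the while loop: n // 10 strictly shrinks while n >= 10
lemma pv_floordiv10_toNat_lt (n : Int) (h : 10 ≤ n) :
    (PySem.Int.floordiv n 10).toNat < n.toNat := by
  rw [PySem.Int.floordiv_eq_ediv_of_pos (by norm_num)]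
  have h2 : n / 10 * 10 ≤ n := Int.ediv_mul_le n (by norm_num)
  have h3 : 0 ≤ n / 10 := Int.ediv_nonneg (by omega) (by norm_num)
  omega

-- the while loop: returns the leftover leading part and the accumulated counters
def pvBLoop (n : Int) (st : Int × Int × Int) : Int × (Int × Int × Int) :=
  if h10 : 10 ≤ n then
    let d := PySem.Int.mod n 10
    let b := pvBucket d
    pvBLoop (PySem.Int.floordiv n 10) (st.1 + b.1, st.2.1 + b.2.1, st.2.2 + b.2.2)
  else (n, st)
termination_by n.toNat
decreasing_by exact pv_floordiv10_toNat_lt n h10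

def digit_count_alt (num : Int) : Int × Int × Int :=
  let r := pvBLoop num (0, 0, 0)
  let b := pvBucket r.1
  (r.2.1 + b.1, r.2.2.1 + b.2.1, r.2.2.2 + b.2.2)

-- ===== PRECONDITION & SPEC =====
-- Pre_ excludes negative num, where str(num) starts with '-' and int('-') raises ValueError in A.
def Pre_digit_count (num : Int) : Prop := 0 ≤ num
instance (num : Int) : Decidable (Pre_digit_count num) := by unfold Pre_digit_count; infer_instance
def pvWitness_digit_count : Int := 100200
def Spec_digit_count (num : Int) (out : Int × Int × Int) : Prop := out = digit_count_alt num
instance (num : Int) (out : Int × Int × Int) : Decidable (Spec_digit_count num out) := by unfold Spec_digit_count; infer_instance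

-- ===== CLAIM (what is proved, stated in full; the proofs are below) =====
def Claim_equal_digit_count : Prop := ∀ (num : Int), Dom_digit_count num → Pre_digit_count num → Spec_digit_count num (digit_count num)

-- ===== LEMMAS AND PROOFS =====
def pvDval (c : Char) : Int := (c.toNat : Int) - 48
def pvIsDigit (c : Char) : Bool := decide (48 ≤ c.toNat ∧ c.toNat ≤ 57)
def pvPz (c : Char) : Bool := pvDval c == 0
def pvPe (c : Char) : Bool := !(pvPz c) && (PySem.Int.mod (pvDval c) 2 == 0)
def pvPo (c : Char) : Bool := !(pvPz c) && !(PySem.Int.mod (pvDval c) 2 == 0)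

lemma pv_char_eq_of_toNat (c : Char) (d : Char) (h : c.toNat = d.toNat) : c = d := by
  apply Char.ext
  exact UInt32.toNat_inj.mp h

-- int(c) = some (value of c) for a decimal digit character c
lemma pv_ofChars_digit (c : Char) (h : pvIsDigit c = true) :
    PySem.Int.ofChars? [c] = some (pvDval c) := by
  have hb : 48 ≤ c.toNat ∧ c.toNat ≤ 57 := by simpa [pvIsDigit] using h
  obtain ⟨h1, h2⟩ := hb
  interval_cases hm : c.toNat <;>
    first
    | (rw [pv_char_eq_of_toNat c '0' (by rw [hm]; rfl)]; decide)
    | (rw [pv_char_eq_of_toNat c '1' (by rw [hm]; rfl)]; decide)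
    | (rw [pv_char_eq_of_toNat c '2' (by rw [hm]; rfl)]; decide)
    | (rw [pv_char_eq_of_toNat c '3' (by rw [hm]; rfl)]; decide)
    | (rw [pv_char_eq_of_toNat c '4' (by rw [hm]; rfl)]; decide)
    | (rw [pv_char_eq_of_toNat c '5' (by rw [hm]; rfl)]; decide)
    | (rw [pv_char_eq_of_toNat c '6' (by rw [hm]; rfl)]; decide)
    | (rw [pv_char_eq_of_toNat c '7' (by rw [hm]; rfl)]; decide)
    | (rw [pv_char_eq_of_toNat c '8' (by rw [hm]; rfl)]; decide)
    | (rw [pv_char_eq_of_toNat c '9' (by rw [hm]; rfl)]; decide)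

lemma pv_digitChar_isDigit (m : Nat) (h : m < 10) : pvIsDigit (Nat.digitChar m) = true := by
  interval_cases m <;> decide

lemma pv_toDigitsCore_mem (fuel n : Nat) (ds : List Char) (c : Char)
    (h : c ∈ Nat.toDigitsCore 10 fuel n ds) : c ∈ ds ∨ pvIsDigit c = true := by
  induction fuel generalizing n ds with
  | zero => simp [Nat.toDigitsCore] at h; exact Or.inl h
  | succ fuel ih =>
    simp only [Nat.toDigitsCore] at h
    by_cases h0 : n / 10 = 0
    · simp [h0] at h
      rcases h with h | h
      · exact Or.inr (h ▸ pv_digitChar_isDigit _ (Nat.mod_lt _ (by norm_num)))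
      · exact Or.inl h
    · simp [h0] at h
      rcases ih _ _ h with h' | h'
      · rcases List.mem_cons.mp h' with h'' | h''
        · exact Or.inr (h'' ▸ pv_digitChar_isDigit _ (Nat.mod_lt _ (by norm_num)))
        · exact Or.inl h''
      · exact Or.inr h'

-- every character str produces for a nonnegative integer is a decimal digit
lemma pv_toDigits_isDigit (n : Nat) (c : Char) (h : c ∈ Nat.toDigits 10 n) :
    pvIsDigit c = true := by
  rcases pv_toDigitsCore_mem _ _ _ _ h with h' | h'
  · simp at h'
  · exact h'

-- A's loop body, over a list of digit characters
lemma pv_foldA (cs : List Char) (h : ∀ c ∈ cs, pvIsDigit c = true) :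
    ∀ init : Int × Int × Int,
    cs.foldl (fun st c =>
      match PySem.Int.ofChars? [c] with
      | none => st
      | some d =>
        if d = 0 then (st.1, st.2.1, st.2.2 + 1)
        else if PySem.Int.mod d 2 = 0 then (st.1 + 1, st.2.1, st.2.2)
        else (st.1, st.2.1 + 1, st.2.2)) init
    = (init.1 + (cs.countP pvPe : Int), init.2.1 + (cs.countP pvPo : Int), init.2.2 + (cs.countP pvPz : Int)) := by
  induction cs with
  | nil => intro init; simp
  | cons c cs ih =>
    intro init
    have hc := h c (List.mem_cons_self)
    have hrest : ∀ x ∈ cs, pvIsDigit x = true := fun x hx => h x (List.mem_cons_of_mem _ hx)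
    rw [List.foldl_cons]
    simp only [pv_ofChars_digit c hc]
    by_cases hz : pvDval c = 0
    · have hbz : (pvDval c == 0) = true := beq_iff_eq.mpr hz
      have hpz : pvPz c = true := by simp only [pvPz, hbz]
      have hpe : pvPe c = false := by simp only [pvPe, pvPz, hbz]; try rfl
      have hpo : pvPo c = false := by simp only [pvPo, pvPz, hbz]; try rfl
      simp only [if_pos hz, ih hrest, List.countP_cons, hpz, hpe, hpo, if_true, Bool.false_eq_true,
        if_false, add_zero, Prod.mk.injEq, true_and]
      push_cast; ring
    · have hbz : (pvDval c == 0) = false := beq_eq_false_iff_ne.mpr hz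
      by_cases hm : PySem.Int.mod (pvDval c) 2 = 0
      · have hbm : (PySem.Int.mod (pvDval c) 2 == 0) = true := beq_iff_eq.mpr hm
        have hpz : pvPz c = false := by simp only [pvPz, hbz]
        have hpe : pvPe c = true := by simp only [pvPe, pvPz, hbz, hbm]; try rfl
        have hpo : pvPo c = false := by simp only [pvPo, pvPz, hbz, hbm]; try rfl
        simp only [if_neg hz, if_pos hm, ih hrest, List.countP_cons, hpz, hpe, hpo, if_true,
          Bool.false_eq_true, if_false, add_zero, Prod.mk.injEq, and_true]
        push_cast; ring
      · have hbm : (PySem.Int.mod (pvDval c) 2 == 0) = false := beq_eq_false_iff_ne.mpr hm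
        have hpz : pvPz c = false := by simp only [pvPz, hbz]
        have hpe : pvPe c = false := by simp only [pvPe, pvPz, hbz, hbm]; try rfl
        have hpo : pvPo c = true := by simp only [pvPo, pvPz, hbz, hbm]; try rfl
        simp only [if_neg hz, if_neg hm, ih hrest, List.countP_cons, hpz, hpe, hpo, if_true,
          Bool.false_eq_true, if_false, add_zero, Prod.mk.injEq, and_true, true_and]
        push_cast; ring

-- a digit value's bucket agrees with the character predicates of its digit character
lemma pv_bucket_char (m : Nat) (h : m < 10) :
    pvBucket (m : Int) = ((if pvPe (Nat.digitChar m) then 1 else 0),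
                          (if pvPo (Nat.digitChar m) then 1 else 0),
                          (if pvPz (Nat.digitChar m) then 1 else 0)) := by
  interval_cases m <;> decide

-- B's while loop followed by the final bucket equals the three digit counts of toDigits 10 k
lemma pv_bloop_spec (k : Nat) : ∀ st : Int × Int × Int,
    (let r := pvBLoop (k : Int) st
     let b := pvBucket r.1
     (r.2.1 + b.1, r.2.2.1 + b.2.1, r.2.2.2 + b.2.2))
    = (st.1 + ((Nat.toDigits 10 k).countP pvPe : Int),
       st.2.1 + ((Nat.toDigits 10 k).countP pvPo : Int),
       st.2.2 + ((Nat.toDigits 10 k).countP pvPz : Int)) := by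
  induction k using Nat.strong_induction_on with
  | _ k ih =>
    intro st
    by_cases hk : 10 ≤ k
    · have hk' : (10 : Int) ≤ (k : Int) := by exact_mod_cast hk
      rw [show pvBLoop (k : Int) st
          = pvBLoop (PySem.Int.floordiv (k : Int) 10)
              (st.1 + (pvBucket (PySem.Int.mod (k : Int) 10)).1,
               st.2.1 + (pvBucket (PySem.Int.mod (k : Int) 10)).2.1,
               st.2.2 + (pvBucket (PySem.Int.mod (k : Int) 10)).2.2) from by
        rw [pvBLoop]; simp [hk']]
      have hfd : PySem.Int.floordiv (k : Int) 10 = ((k / 10 : Nat) : Int) := by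
        exact_mod_cast PySem.Int.floordiv_natCast k 10
      have hmd : PySem.Int.mod (k : Int) 10 = ((k % 10 : Nat) : Int) := by
        exact_mod_cast PySem.Int.mod_natCast k 10
      rw [hfd, hmd]
      have hlt : k / 10 < k := Nat.div_lt_self (by omega) (by norm_num)
      rw [ih (k / 10) hlt]
      rw [Nat.toDigits_of_base_le (by norm_num) hk]
      rw [pv_bucket_char (k % 10) (Nat.mod_lt _ (by norm_num))]
      simp only [List.countP_append, List.countP_cons, List.countP_nil]
      push_cast [apply_ite (fun n : Nat => (n : Int))]
      simp only [Prod.mk.injEq]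
      refine ⟨by ring, by ring, by ring⟩
    · have hk' : ¬ (10 : Int) ≤ (k : Int) := by exact_mod_cast hk
      rw [show pvBLoop (k : Int) st = ((k : Int), st) from by rw [pvBLoop]; simp [hk']]
      dsimp only
      rw [Nat.toDigits_of_lt_base (show k < 10 by omega)]
      rw [pv_bucket_char k (by omega)]
      simp only [List.countP_cons, List.countP_nil]
      push_cast [apply_ite (fun n : Nat => (n : Int))]
      simp

-- ===== VERDICT (by name: the statement is the Claim_ definition above) =====
theorem digit_count_spec : Claim_equal_digit_count := by
  intro num _hdom hpre
  replace hpre : (0 : Int) ≤ num := hpre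
  unfold Spec_digit_count digit_count digit_count_alt
  have hcs : (PySem.Int.toStr num).toList = Nat.toDigits 10 num.toNat := by
    rw [PySem.Int.toList_toStr]
    unfold PySem.Int.toChars
    rw [if_neg (by omega)]
  simp only [hcs, PySem.List.len_eq]
  set cs := Nat.toDigits 10 num.toNat with hcsdef
  have hd : ∀ c ∈ cs, pvIsDigit c = true := fun c hc => pv_toDigits_isDigit num.toNat c hc
  rw [PySem.List.foldl_pyRange_zero_pyGetD' cs ' '
    (fun (st : Int × Int × Int) c =>
      match PySem.Int.ofChars? [c] with
      | none => st
      | some d =>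
        if d = 0 then (st.1, st.2.1, st.2.2 + 1)
        else if PySem.Int.mod d 2 = 0 then (st.1 + 1, st.2.1, st.2.2)
        else (st.1, st.2.1 + 1, st.2.2)) (0,0,0)]
  rw [pv_foldA cs hd (0,0,0)]
  have hnum : ((num.toNat : Nat) : Int) = num := Int.toNat_of_nonneg hpre
  have := pv_bloop_spec num.toNat (0, 0, 0)
  rw [hnum] at this
  simp only [← hcsdef] at this
  rw [this]
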